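-- pv_equiv track=rewrite | github.com/gfigneczi1/hlb | _python_evaluation/acceleration_learning/preprocessing/map/nds_grid.py | _tileId
-- ===== SOURCE A (Python) =====
-- def _tileId(slRow, slColumn, ndsLevel):
--     # Loop over the level+1 last Bits found in slRow and slColumn.
--     # Always copy the row-Bit to the same location in tileNumber.
--     # Then shift tileNumber one to the Left and copy the column-Bit.
--     tileNumber = 0
--     mask = (1 << ndsLevel)
--
--     # Level 0 gets only one bit.
--     # It is the inverse of the bit found in slColumn[level]
--     tileNumber |= (slColumn & mask)
--     mask >>= 1
--
--     while mask > 0: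
--         # The remaining Levels get the Bits as they are found in slRow and slColumn
--         tileNumber |= (slRow & mask)
--         tileNumber <<= 1
--         tileNumber |= (slColumn & mask)
--         mask >>= 1
--
--     # Now all necessary Bits of the TileNumber are set.
--     # The Tile-Id can get derived from Level and TileNumber :
--     compactId = 1
--     compactId <<= (16 + ndsLevel)
--     return int(compactId | tileNumber)
-- ===== SOURCE B (Python) =====
-- def _tileId(slRow, slColumn, ndsLevel):
--     # Direct placement, low-to-high: each row/column bit is extracted and
--     # added at its final interleaved position via a running weight w = 4**i;
--     # no shifted running accumulator and no OR-merging of partial results.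
--     tile = 0
--     w = 1
--     for i in range(ndsLevel):
--         tile += ((slColumn >> i) & 1) * w
--         tile += ((slRow >> i) & 1) * 2 * w
--         w *= 4
--     tile += ((slColumn >> ndsLevel) & 1) * w
--     return (1 << (16 + ndsLevel)) | tile
-- ===== Notes on version B (the rewrite author's own statement) =====
-- stated objective: alternative
-- what changed: Replaces A's high-to-low OR-and-shift running accumulator with direct low-to-high placement: each row/column bit is extracted with a shift-and-mask and added at its final interleaved position via a running positional weight (w = 4**i), with no shifting of the accumulator and no OR-merging inside the loop.
import Mathlib
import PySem

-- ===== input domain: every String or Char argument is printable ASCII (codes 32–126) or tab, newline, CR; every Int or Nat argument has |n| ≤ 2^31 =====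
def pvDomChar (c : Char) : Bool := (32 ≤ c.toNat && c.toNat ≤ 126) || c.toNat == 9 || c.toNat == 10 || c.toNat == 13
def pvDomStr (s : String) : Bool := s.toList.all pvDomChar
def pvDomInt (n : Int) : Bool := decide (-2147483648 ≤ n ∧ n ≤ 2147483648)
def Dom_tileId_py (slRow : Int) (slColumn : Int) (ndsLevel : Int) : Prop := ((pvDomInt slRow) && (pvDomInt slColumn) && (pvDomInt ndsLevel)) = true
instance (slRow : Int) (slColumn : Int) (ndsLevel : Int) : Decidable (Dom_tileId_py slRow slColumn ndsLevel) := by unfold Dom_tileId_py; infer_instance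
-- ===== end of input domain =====

-- B replaces A's high-to-low OR-and-shift running accumulator with direct low-to-high
-- placement of each bit, added at its final interleaved position via a running
-- positional weight (objective: alternative).

-- ===== PORT A =====
-- the 'while mask > 0' loop of A
def tileLoopA (slRow : Int) (slColumn : Int) (tileNumber : Int) (mask : Int) : Int :=
  if h : 0 < mask then
    tileLoopA slRow slColumn
      (PySem.Int.bor ((PySem.Int.bor tileNumber (PySem.Int.band slRow mask)) <<< 1)
        (PySem.Int.band slColumn mask))
      (mask >>> 1)
  else tileNumber
termination_by mask.toNat
decreasing_by
  obtain ⟨n, rfl⟩ : ∃ n : Nat, mask = (n : Int) := ⟨mask.toNat, (Int.toNat_of_nonneg h.le).symm⟩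
  rw [show ((1:Int)) = ((1:Nat):Int) from rfl, Int.shiftRight_natCast]
  simp only [Int.toNat_natCast]
  simp only [Nat.shiftRight_eq_div_pow, pow_one]
  omega

def tileId_py (slRow : Int) (slColumn : Int) (ndsLevel : Int) : Int :=
  let tileNumber : Int := 0
  let mask : Int := 1 <<< ndsLevel.toNat
  let tileNumber := PySem.Int.bor tileNumber (PySem.Int.band slColumn mask)
  let mask := mask >>> 1
  let tileNumber := tileLoopA slRow slColumn tileNumber mask
  let compactId : Int := 1 <<< (16 + ndsLevel).toNat
  PySem.Int.bor compactId tileNumber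

-- ===== PORT B =====
def tileId_py_alt (slRow : Int) (slColumn : Int) (ndsLevel : Int) : Int :=
  let p : Int × Int := (PySem.List.pyRange 0 ndsLevel 1).foldl
    (fun (p : Int × Int) i =>
      let tile := p.1 + (PySem.Int.band (slColumn >>> i.toNat) 1) * p.2
      let tile := tile + (PySem.Int.band (slRow >>> i.toNat) 1) * 2 * p.2
      let w := p.2 * 4
      (tile, w)) (0, 1)
  let tile := p.1 + (PySem.Int.band (slColumn >>> ndsLevel.toNat) 1) * p.2
  PySem.Int.bor (1 <<< (16 + ndsLevel).toNat) tile

-- ===== PRECONDITION & SPEC =====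
-- Pre_ excludes only ndsLevel < 0, where Python A raises ValueError ('negative shift count').
def Pre_tileId_py (slRow : Int) (slColumn : Int) (ndsLevel : Int) : Prop := 0 ≤ ndsLevel
instance (slRow : Int) (slColumn : Int) (ndsLevel : Int) : Decidable (Pre_tileId_py slRow slColumn ndsLevel) := by unfold Pre_tileId_py; infer_instance
def pvWitness_tileId_py : Int × Int × Int := (5, 9, 3)

def Spec_tileId_py (slRow : Int) (slColumn : Int) (ndsLevel : Int) (out : Int) : Prop := out = tileId_py_alt slRow slColumn ndsLevel
instance (slRow : Int) (slColumn : Int) (ndsLevel : Int) (out : Int) : Decidable (Spec_tileId_py slRow slColumn ndsLevel out) := by unfold Spec_tileId_py; infer_instance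

-- ===== CLAIM (what is proved, stated in full; the proofs are below) =====
def Claim_equal_tileId_py : Prop := ∀ (slRow : Int) (slColumn : Int) (ndsLevel : Int), Dom_tileId_py slRow slColumn ndsLevel → Pre_tileId_py slRow slColumn ndsLevel → Spec_tileId_py slRow slColumn ndsLevel (tileId_py slRow slColumn ndsLevel)

-- ===== LEMMAS AND PROOFS =====

-- bit k of x in Python's infinite two's complement, as a Nat (0 or 1)
def pvBit (x : Int) (k : Nat) : Nat :=
  match x with
  | .ofNat m => (m.testBit k).toNat
  | .negSucc m => 1 - (m.testBit k).toNat

theorem pvBit_le (x : Int) (k : Nat) : pvBit x k ≤ 1 := by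
  cases x <;> simp [pvBit] <;> cases Nat.testBit _ k <;> simp

theorem bitMulLt (b e : Nat) (hb : b ≤ 1) : b * 2 ^ e < 2 ^ (e + 1) := by
  have h := Nat.mul_le_mul_right (2 ^ e) hb
  have hp : 0 < 2 ^ e := pow_pos (by norm_num) e
  have h2 : (2:ℕ) ^ (e + 1) = 2 * 2 ^ e := by ring
  omega

theorem nat_mod2_testBit (m k : Nat) : (m >>> k) % 2 = (m.testBit k).toNat := by
  rw [Nat.testBit_eq_decide_div_mod_eq, Nat.shiftRight_eq_div_pow]
  rcases Nat.mod_two_eq_zero_or_one (m / 2 ^ k) with h | h <;> simp [h]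

theorem nat_and_one_testBit (m k : Nat) : (m >>> k) &&& 1 = (m.testBit k).toNat := by
  rw [Nat.and_one_is_mod, nat_mod2_testBit]

theorem band_one_eq (x : Int) (k : Nat) :
    PySem.Int.band (x >>> (k : Int)) 1 = ((pvBit x k : Nat) : Int) := by
  rw [Int.shiftRight_natCast_right]
  cases x with
  | ofNat m =>
      have hs : ((Int.ofNat m) >>> k) = ((m >>> k : Nat) : Int) := rfl
      rw [hs, show ((1:Int)) = ((1:Nat):Int) from rfl, PySem.Int.band_natCast,
        nat_and_one_testBit]
      rfl
  | negSucc m =>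
      have hs : ((Int.negSucc m) >>> k) = Int.negSucc (m >>> k) := rfl
      rw [hs]
      have hneg : ¬ (0 : Int) ≤ Int.negSucc (m >>> k) := not_le.mpr (Int.negSucc_lt_zero _)
      have harg : (-(Int.negSucc (m >>> k)) - 1).toNat = m >>> k := by
        rw [Int.neg_negSucc]; omega
      simp only [PySem.Int.band, hneg, if_false, if_pos (by norm_num : (0:Int) ≤ 1), harg]
      norm_num
      rw [nat_mod2_testBit]
      rfl

theorem band_pow_eq (x : Int) (k : Nat) :
    PySem.Int.band x ((2 ^ k : Nat) : Int) = ((pvBit x k * 2 ^ k : Nat) : Int) := by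
  cases x with
  | ofNat m =>
      rw [show (Int.ofNat m) = ((m : Nat) : Int) from rfl, PySem.Int.band_natCast]
      simp [pvBit, Nat.and_two_pow]
  | negSucc m =>
      have hneg : ¬ (0 : Int) ≤ Int.negSucc m := not_le.mpr (Int.negSucc_lt_zero _)
      have harg : (-(Int.negSucc m) - 1).toNat = m := by
        rw [Int.neg_negSucc]; omega
      have hpos : (0 : Int) ≤ ((2 ^ k : Nat) : Int) := by positivity
      simp only [PySem.Int.band, hneg, if_false, if_pos hpos, harg]
      have htn : ((2 ^ k : Nat) : Int).toNat = 2 ^ k := Int.toNat_natCast _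
      rw [htn, Nat.two_pow_and]
      have : 2 ^ k - 2 ^ k * (m.testBit k).toNat = (1 - (m.testBit k).toNat) * 2 ^ k := by
        cases Nat.testBit m k <;> simp
      rw [this]
      rfl

-- disjoint OR is addition: the high part has its low n bits clear, the low part fits in them
theorem orAdd (a b n : Nat) (ha : 2 ^ n ∣ a) (hb : b < 2 ^ n) : a ||| b = a + b := by
  obtain ⟨c, rfl⟩ := ha
  have h1 : 2 ^ n * c = c <<< n := by rw [Nat.shiftLeft_eq, Nat.mul_comm]
  rw [h1, ← Nat.shiftLeft_add_eq_or_of_lt hb]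

-- the interleaved value of the low n row/column bits
def pvS (R C : Int) (n : Nat) : Nat :=
  ∑ i ∈ Finset.range n, (pvBit R i * 2 ^ (2 * i + 1) + pvBit C i * 2 ^ (2 * i))

theorem pvS_succ (R C : Int) (k : Nat) :
    pvS R C (k + 1) = pvS R C k + (pvBit R k * 2 ^ (2 * k + 1) + pvBit C k * 2 ^ (2 * k)) := by
  simp [pvS, Finset.sum_range_succ]

theorem castShiftL1 (m : Nat) : ((m : Int) <<< (1 : Int)) = ((m <<< 1 : Nat) : Int) := by
  simpa using Int.shiftLeft_natCast m 1

theorem castShiftR1 (m : Nat) : ((m : Int) >>> (1 : Int)) = ((m >>> 1 : Nat) : Int) := by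
  have h := Int.shiftRight_natCast m 1
  simpa using h

-- A's loop, entered with mask = 2^k and an accumulator whose low k+1 bits are clear,
-- shifts the accumulator up k+1 more places and fills in the interleaved low bits
theorem loopA_eq (R C : Int) (k : Nat) :
    ∀ t : Nat, 2 ^ (k + 1) ∣ t →
      tileLoopA R C ((t : Nat) : Int) (((2 ^ k : Nat) : Int)) =
        ((t * 2 ^ (k + 1) + pvS R C (k + 1) : Nat) : Int) := by
  induction k with
  | zero =>
      intro t ht
      rw [tileLoopA]
      rw [dif_pos (by norm_num : (0 : Int) < ((2 ^ 0 : Nat) : Int))]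
      rw [show ((2 ^ 0 : Nat) : Int) = (((2 ^ 0 : Nat) : Nat) : Int) from rfl]
      rw [band_pow_eq R 0, band_pow_eq C 0]
      rw [show PySem.Int.bor ((t : Nat) : Int) ((pvBit R 0 * 2 ^ 0 : Nat) : Int)
          = ((t ||| pvBit R 0 * 2 ^ 0 : Nat) : Int) from PySem.Int.bor_natCast _ _]
      rw [orAdd t _ 1 ht (by have := pvBit_le R 0; omega)]
      rw [castShiftL1]
      rw [show PySem.Int.bor (((t + pvBit R 0 * 2 ^ 0) <<< 1 : Nat) : Int) ((pvBit C 0 * 2 ^ 0 : Nat) : Int)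
          = (((t + pvBit R 0 * 2 ^ 0) <<< 1 ||| pvBit C 0 * 2 ^ 0 : Nat) : Int) from PySem.Int.bor_natCast _ _]
      rw [orAdd _ _ 1 (by rw [Nat.shiftLeft_eq]; omega) (by have := pvBit_le C 0; omega)]
      rw [castShiftR1]
      rw [show ((2:Nat) ^ 0 >>> 1) = 0 from by decide]
      rw [tileLoopA, dif_neg (by norm_num)]
      rw [show (t * 2 ^ (0 + 1) + pvS R C (0 + 1) : Nat)
          = (t + pvBit R 0 * 2 ^ 0) <<< 1 + pvBit C 0 * 2 ^ 0 from by
        rw [pvS_succ, Nat.shiftLeft_eq]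
        simp [pvS]
        ring]
  | succ j ih =>
      intro t ht
      obtain ⟨c, hc⟩ := ht
      rw [tileLoopA]
      rw [dif_pos (by positivity : (0 : Int) < ((2 ^ (j + 1) : Nat) : Int))]
      rw [band_pow_eq R (j + 1), band_pow_eq C (j + 1)]
      rw [show PySem.Int.bor ((t : Nat) : Int) ((pvBit R (j + 1) * 2 ^ (j + 1) : Nat) : Int)
          = ((t ||| pvBit R (j + 1) * 2 ^ (j + 1) : Nat) : Int) from PySem.Int.bor_natCast _ _]
      have hlt1 : pvBit R (j + 1) * 2 ^ (j + 1) < 2 ^ (j + 2) :=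
        bitMulLt _ _ (pvBit_le R (j + 1))
      rw [orAdd t _ (j + 2) ⟨c, hc⟩ hlt1]
      rw [castShiftL1]
      set u : Nat := (t + pvBit R (j + 1) * 2 ^ (j + 1)) <<< 1 with hu
      rw [show PySem.Int.bor ((u : Nat) : Int) ((pvBit C (j + 1) * 2 ^ (j + 1) : Nat) : Int)
          = ((u ||| pvBit C (j + 1) * 2 ^ (j + 1) : Nat) : Int) from PySem.Int.bor_natCast _ _]
      have hdu : 2 ^ (j + 2) ∣ u := by
        refine ⟨2 * c + pvBit R (j + 1), ?_⟩
        rw [hu, Nat.shiftLeft_eq, hc]; ring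
      have hlt2 : pvBit C (j + 1) * 2 ^ (j + 1) < 2 ^ (j + 2) :=
        bitMulLt _ _ (pvBit_le C (j + 1))
      rw [orAdd u _ (j + 2) hdu hlt2]
      rw [castShiftR1]
      have hm2 : (2 ^ (j + 1) : Nat) >>> 1 = 2 ^ j := by
        rw [Nat.shiftRight_eq_div_pow, pow_one, pow_succ, Nat.mul_div_cancel _ (by norm_num)]
      rw [hm2]
      have hdu2 : 2 ^ (j + 1) ∣ u + pvBit C (j + 1) * 2 ^ (j + 1) := by
        obtain ⟨d, hd⟩ := hdu
        exact ⟨2 * d + pvBit C (j + 1), by rw [hd]; ring⟩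
      rw [ih _ hdu2]
      congr 1
      rw [pvS_succ R C (j + 1), hu, Nat.shiftLeft_eq, hc]
      ring

-- B's loop: after i iterations the state is (interleaved low bits, weight 4^i)
theorem foldB_eq (R C : Int) (k : Nat) :
    (PySem.List.pyRange 0 (k : Int) 1).foldl
      (fun (p : Int × Int) i =>
        let tile := p.1 + (PySem.Int.band (C >>> i.toNat) 1) * p.2
        let tile := tile + (PySem.Int.band (R >>> i.toNat) 1) * 2 * p.2
        let w := p.2 * 4
        (tile, w)) ((0 : Int), (1 : Int))
    = (((pvS R C k : Nat) : Int), ((4 ^ k : Nat) : Int)) := by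
  induction k with
  | zero =>
      rw [show PySem.List.pyRange 0 ((0 : Nat) : Int) 1 = [] from by
        rw [PySem.List.pyRange_one]; simp]
      simp [pvS]
  | succ k ih =>
      have hsplit : PySem.List.pyRange 0 ((k + 1 : Nat) : Int) 1
          = PySem.List.pyRange 0 (k : Int) 1 ++ [((k : Nat) : Int)] := by
        rw [PySem.List.pyRange_one, PySem.List.pyRange_one]
        rw [show ((((k + 1 : Nat)) : Int) - 0).toNat = k + 1 by omega]
        rw [show (((k : Nat) : Int) - 0).toNat = k by omega]
        rw [List.range_succ, List.map_append]
        simp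
      rw [hsplit, List.foldl_append, ih]
      simp only [List.foldl_cons, List.foldl_nil]
      rw [show (((k : Nat) : Int)).toNat = k from Int.toNat_natCast _]
      rw [band_one_eq R k, band_one_eq C k]
      have h4 : (4 : Nat) ^ k = 2 ^ (2 * k) := by
        rw [pow_mul]; norm_num
      have h1 : pvS R C k + pvBit C k * 4 ^ k + pvBit R k * 2 * 4 ^ k = pvS R C (k + 1) := by
        rw [pvS_succ, h4, pow_succ]; ring
      have h2 : (4 : Nat) ^ k * 4 = 4 ^ (k + 1) := (pow_succ 4 k).symm
      refine Prod.ext ?_ ?_ <;> simp only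
      · rw [← h1]; push_cast; ring
      · rw [← h2]; push_cast; ring

-- ===== VERDICT helpers =====
theorem tiles_eq (R C : Int) (n : Nat) :
    tileId_py R C (n : Int) = tileId_py_alt R C (n : Int) := by
  show PySem.Int.bor _ _ = PySem.Int.bor _ _
  congr 1
  rw [show (((n : Nat) : Int)).toNat = n from Int.toNat_natCast _]
  rw [show ((1 <<< n : Nat)) = (2 ^ n : Nat) by rw [Nat.shiftLeft_eq, one_mul]]
  rw [band_pow_eq C n]
  rw [show PySem.Int.bor 0 ((pvBit C n * 2 ^ n : Nat) : Int)
      = ((0 ||| pvBit C n * 2 ^ n : Nat) : Int) from PySem.Int.bor_natCast 0 _]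
  rw [Nat.zero_or, castShiftR1]
  cases n with
  | zero =>
      rw [show ((2:Nat) ^ 0 >>> 1) = 0 from by decide]
      rw [tileLoopA, dif_neg (by norm_num)]
      rw [show PySem.List.pyRange 0 ((0 : Nat) : Int) 1 = [] from by
        rw [PySem.List.pyRange_one]; simp]
      rw [List.foldl_nil]
      rw [← Int.shiftRight_natCast_right C 0, band_one_eq C 0]
      push_cast
      ring
  | succ m =>
      rw [show ((2 ^ (m + 1) : Nat) >>> 1 : Nat) = 2 ^ m by
        rw [Nat.shiftRight_eq_div_pow, pow_one, pow_succ, Nat.mul_div_cancel _ (by norm_num)]]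
      have hdvd : (2:Nat) ^ (m + 1) ∣ pvBit C (m + 1) * 2 ^ (m + 1) := ⟨pvBit C (m + 1), Nat.mul_comm _ _⟩
      rw [loopA_eq R C m _ hdvd]
      rw [foldB_eq R C (m + 1)]
      rw [← Int.shiftRight_natCast_right C (m + 1), band_one_eq C (m + 1)]
      simp only
      have h4 : (4 : Nat) ^ (m + 1) = 2 ^ (m + 1) * 2 ^ (m + 1) := by
        rw [show (4 : Nat) = 2 * 2 by norm_num, mul_pow]
      have h1 : pvBit C (m + 1) * 2 ^ (m + 1) * 2 ^ (m + 1) + pvS R C (m + 1)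
          = pvS R C (m + 1) + pvBit C (m + 1) * 4 ^ (m + 1) := by
        rw [h4]; ring
      rw [h1]
      push_cast
      ring

theorem tileId_py_spec : Claim_equal_tileId_py := by
  intro slRow slColumn ndsLevel _ hpre
  unfold Spec_tileId_py
  obtain ⟨n, rfl⟩ : ∃ n : Nat, ndsLevel = (n : Int) :=
    ⟨ndsLevel.toNat, (Int.toNat_of_nonneg hpre).symm⟩
  exact tiles_eq slRow slColumn n
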